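-- pv_equiv track=rewrite | github.com/taegnag/pythondatascience | 202224103 homework3.py | find_end_pts
-- ===== SOURCE A (Python) =====
-- def find_end_pts(ch_list):
--     """
--     ch_list: list of points in all pollygons
--     """
--
--     left_most = ch_list[0]
--     right_most = ch_list[0]
--
--     for i in range(len(ch_list)):
--         if left_most[0] > ch_list[i][0]: # and left_most[1] > ch_list[i][1]:
--             left_most = ch_list[i]
--         elif left_most[0] == ch_list[i][0] and left_most[1] > ch_list[i][1]:
--             left_most = ch_list[i]
--         if right_most[0] < ch_list[i][0]: # and right_most[1] < ch_list[i][1]: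
--             right_most = ch_list[i]
--         elif right_most[0] == ch_list[i][0] and right_most[1] > ch_list[i][1]:
--             right_most = ch_list[i]
--
--     return left_most, right_most
-- ===== SOURCE B (Python) =====
-- def find_end_pts(ch_list):
--     """
--     ch_list: list of points in all pollygons
--     """
--     s = sorted(ch_list)
--     left_most = s[0]
--     # rightmost = (max x, smallest y among max-x): first element of the
--     # max-x block in the lexicographically sorted list; find it by binary search.
--     xr = s[-1][0]
--     lo, hi = 0, len(s) - 1
--     while lo < hi:
--         mid = (lo + hi) // 2
--         if s[mid][0] < xr:
--             lo = mid + 1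
--         else:
--             hi = mid
--     return left_most, s[lo]
-- ===== Notes on version B (the rewrite author's own statement) =====
-- stated objective: alternative
-- what changed: Replaced A's one-pass comparison loop by sort-then-select: sort the points lexicographically once, take the head as the leftmost point, and binary-search for the start of the maximal-x block (whose first element has the smallest y among max-x) as the rightmost point.
import Mathlib
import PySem

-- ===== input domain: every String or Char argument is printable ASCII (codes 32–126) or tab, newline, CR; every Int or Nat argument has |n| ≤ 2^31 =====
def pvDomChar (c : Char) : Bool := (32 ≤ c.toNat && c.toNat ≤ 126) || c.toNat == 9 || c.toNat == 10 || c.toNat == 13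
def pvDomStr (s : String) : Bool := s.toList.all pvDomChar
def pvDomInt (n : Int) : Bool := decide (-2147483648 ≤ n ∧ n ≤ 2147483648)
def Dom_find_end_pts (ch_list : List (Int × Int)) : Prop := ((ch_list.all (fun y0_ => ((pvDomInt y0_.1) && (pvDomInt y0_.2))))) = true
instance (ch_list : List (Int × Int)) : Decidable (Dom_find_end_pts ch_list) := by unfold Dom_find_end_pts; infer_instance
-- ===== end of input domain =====

-- B replaces A's single comparison loop by sort-then-select (lex sort; head = leftmost,
-- binary search for the start of the max-x block = rightmost); equivalence of the return value.

-- ===== PORT A =====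
-- A's loop body for one index i, acting on (left_most, right_most).
def findEndStep (lr : (Int × Int) × (Int × Int)) (p : Int × Int) : (Int × Int) × (Int × Int) :=
  let l := if lr.1.1 > p.1 then p
           else if lr.1.1 = p.1 ∧ lr.1.2 > p.2 then p else lr.1
  let r := if lr.2.1 < p.1 then p
           else if lr.2.1 = p.1 ∧ lr.2.2 > p.2 then p else lr.2
  (l, r)

def find_end_pts (ch_list : List (Int × Int)) : (Int × Int) × (Int × Int) :=
  match ch_list with
  | [] => ((0, 0), (0, 0))   -- Python raises IndexError at ch_list[0]; excluded by Pre_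
  | x :: _ =>
    (PySem.List.pyRange 0 ch_list.length 1).foldl
      (fun lr i => findEndStep lr (PySem.List.pyGetD ch_list i (0, 0))) (x, x)

-- ===== PORT B =====
-- midpoint bounds, cited by bsearch's decreasing_by
theorem bsearch_mid_bounds {lo hi : Int} (h : lo < hi) :
    lo ≤ PySem.Int.floordiv (lo + hi) 2 ∧ PySem.Int.floordiv (lo + hi) 2 < hi := by
  have hb := PySem.Int.floordiv_two_mid_bounds (le_of_lt h)
  refine ⟨hb.1, ?_⟩
  rw [PySem.Int.floordiv_lt_iff_lt_mul (by omega : (0:Int) < 2)]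
  omega

-- B's while loop: first index in [lo, hi] whose x-coordinate is not below xr
-- (indices always in range under Pre_; pyGetD's default is never read there).
def bsearch (s : List (Int × Int)) (xr : Int) (lo hi : Int) : Int :=
  if h : lo < hi then
    let mid := PySem.Int.floordiv (lo + hi) 2
    if (PySem.List.pyGetD s mid (0, 0)).1 < xr then bsearch s xr (mid + 1) hi
    else bsearch s xr lo mid
  else lo
termination_by (hi - lo).toNat
decreasing_by
  · have := bsearch_mid_bounds h; omega
  · have := bsearch_mid_bounds h; omega

def find_end_pts_alt (ch_list : List (Int × Int)) : (Int × Int) × (Int × Int) :=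
  let s := PySem.List.sorted2 ch_list (fun p => p.1) (fun p => p.2)
  let left := PySem.List.pyGetD s 0 (0, 0)            -- s[0]; Python raises IndexError on []; excluded by Pre_
  let xr := (PySem.List.pyGetD s (-1) (0, 0)).1       -- s[-1][0]
  (left, PySem.List.pyGetD s (bsearch s xr 0 (PySem.List.len s - 1)) (0, 0))

-- ===== PRECONDITION & SPEC =====
-- Pre_ excludes only the empty list, on which Python A raises IndexError (and B too, at s[0]).
def Pre_find_end_pts (ch_list : List (Int × Int)) : Prop := ch_list ≠ []
instance (ch_list : List (Int × Int)) : Decidable (Pre_find_end_pts ch_list) := by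
  unfold Pre_find_end_pts; infer_instance

def pvWitness_find_end_pts : (List (Int × Int)) := [(1, 2), (0, 3)]

def Spec_find_end_pts (ch_list : List (Int × Int)) (out : (Int × Int) × (Int × Int)) : Prop := out = find_end_pts_alt ch_list
instance (ch_list : List (Int × Int)) (out : (Int × Int) × (Int × Int)) : Decidable (Spec_find_end_pts ch_list out) := by unfold Spec_find_end_pts; infer_instance

-- ===== CLAIM (what is proved, stated in full; the proofs are below) =====
def Claim_equal_find_end_pts : Prop := ∀ (ch_list : List (Int × Int)), Dom_find_end_pts ch_list → Pre_find_end_pts ch_list → Spec_find_end_pts ch_list (find_end_pts ch_list)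

-- ===== LEMMAS AND PROOFS =====

-- Lexicographic "left-most" order and A's "right-most" order (value-level).
def lexLe (m y : Int × Int) : Prop := m.1 < y.1 ∨ (m.1 = y.1 ∧ m.2 ≤ y.2)
def revLe (m y : Int × Int) : Prop := y.1 < m.1 ∨ (m.1 = y.1 ∧ m.2 ≤ y.2)

lemma lexLe_refl (a : Int × Int) : lexLe a a := by unfold lexLe; omega
lemma revLe_refl (a : Int × Int) : revLe a a := by unfold revLe; omega
lemma lexLe_trans {a b c : Int × Int} (h1 : lexLe a b) (h2 : lexLe b c) : lexLe a c := by
  unfold lexLe at *; omega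
lemma lexLe_antisymm {a b : Int × Int} (h1 : lexLe a b) (h2 : lexLe b a) : a = b := by
  rcases a with ⟨a1, a2⟩; rcases b with ⟨b1, b2⟩
  unfold lexLe at *; simp at *; omega
lemma revLe_antisymm {a b : Int × Int} (h1 : revLe a b) (h2 : revLe b a) : a = b := by
  rcases a with ⟨a1, a2⟩; rcases b with ⟨b1, b2⟩
  unfold revLe at *; simp at *; omega

-- A's two update rules, extracted from findEndStep.
def stepL (m p : Int × Int) : Int × Int :=
  if p.1 < m.1 ∨ (m.1 = p.1 ∧ p.2 < m.2) then p else m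

def stepR (m p : Int × Int) : Int × Int :=
  if m.1 < p.1 ∨ (m.1 = p.1 ∧ p.2 < m.2) then p else m

lemma findEndStep_eq (lr : (Int × Int) × (Int × Int)) (p : Int × Int) :
    findEndStep lr p = (stepL lr.1 p, stepR lr.2 p) := by
  simp only [findEndStep, stepL, stepR]
  refine Prod.ext ?_ ?_ <;> (dsimp only; split_ifs <;> first | rfl | omega)

lemma stepL_self (p : Int × Int) : stepL p p = p := by simp [stepL]
lemma stepR_self (p : Int × Int) : stepR p p = p := by simp [stepR]

lemma foldl_prod (t : List (Int × Int)) (a b : Int × Int) :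
    t.foldl (fun lr p => (stepL lr.1 p, stepR lr.2 p)) (a, b) =
      (t.foldl stepL a, t.foldl stepR b) := by
  induction t generalizing a b with
  | nil => rfl
  | cons x t ih => simp [List.foldl, ih]

-- A's left fold computes a lexLe-minimum of x :: t.
lemma foldl_stepL_spec (t : List (Int × Int)) (x : Int × Int) :
    t.foldl stepL x ∈ x :: t ∧ ∀ y ∈ x :: t, lexLe (t.foldl stepL x) y := by
  induction t generalizing x with
  | nil => exact ⟨List.mem_singleton.mpr rfl, by
      intro y hy; rcases List.mem_singleton.mp hy with rfl; exact lexLe_refl _⟩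
  | cons y t ih =>
    have h := ih (stepL x y)
    have hxy : stepL x y = x ∨ stepL x y = y := by unfold stepL; split_ifs <;> simp
    have hlx : lexLe (stepL x y) x := by unfold stepL lexLe; split_ifs <;> omega
    have hly : lexLe (stepL x y) y := by unfold stepL lexLe; split_ifs <;> omega
    have hmemL := h.2 _ (List.mem_cons_self ..)
    constructor
    · show List.foldl stepL (stepL x y) t ∈ x :: y :: t
      rcases List.mem_cons.mp h.1 with hm | hm
      · rcases hxy with h' | h'
        · exact List.mem_cons.mpr (Or.inl (hm.trans h'))
        · exact List.mem_cons.mpr (Or.inr (List.mem_cons.mpr (Or.inl (hm.trans h'))))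
      · exact List.mem_cons.mpr (Or.inr (List.mem_cons.mpr (Or.inr hm)))
    · intro z hz
      rcases List.mem_cons.mp hz with rfl | hz
      · exact lexLe_trans hmemL hlx
      · rcases List.mem_cons.mp hz with rfl | hz
        · exact lexLe_trans hmemL hly
        · exact h.2 z (List.mem_cons_of_mem _ hz)

-- A's right fold computes a revLe-minimum of x :: t.
lemma foldl_stepR_spec (t : List (Int × Int)) (x : Int × Int) :
    t.foldl stepR x ∈ x :: t ∧ ∀ y ∈ x :: t, revLe (t.foldl stepR x) y := by
  induction t generalizing x with
  | nil => exact ⟨List.mem_singleton.mpr rfl, by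
      intro y hy; rcases List.mem_singleton.mp hy with rfl; exact revLe_refl _⟩
  | cons y t ih =>
    have h := ih (stepR x y)
    have hxy : stepR x y = x ∨ stepR x y = y := by unfold stepR; split_ifs <;> simp
    have hlx : revLe (stepR x y) x := by unfold stepR revLe; split_ifs <;> omega
    have hly : revLe (stepR x y) y := by unfold stepR revLe; split_ifs <;> omega
    have htrans : ∀ a b c : Int × Int, revLe a b → revLe b c → revLe a c := by
      unfold revLe; intros; omega
    have hmemL := h.2 _ (List.mem_cons_self ..)
    constructor
    · show List.foldl stepR (stepR x y) t ∈ x :: y :: t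
      rcases List.mem_cons.mp h.1 with hm | hm
      · rcases hxy with h' | h'
        · exact List.mem_cons.mpr (Or.inl (hm.trans h'))
        · exact List.mem_cons.mpr (Or.inr (List.mem_cons.mpr (Or.inl (hm.trans h'))))
      · exact List.mem_cons.mpr (Or.inr (List.mem_cons.mpr (Or.inr hm)))
    · intro z hz
      rcases List.mem_cons.mp hz with rfl | hz
      · exact htrans _ _ _ hmemL hlx
      · rcases List.mem_cons.mp hz with rfl | hz
        · exact htrans _ _ _ hmemL hly
        · exact h.2 z (List.mem_cons_of_mem _ hz)

-- B's comparison function (the one sorted2 uses for these keys).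
def lexLtB (a b : Int × Int) : Bool :=
  decide (a.1 < b.1) || !decide (b.1 < a.1) && decide (a.2 < b.2)

lemma lexLtB_true_lexLe {a b : Int × Int} (h : lexLtB a b = true) : lexLe a b := by
  unfold lexLtB at h; unfold lexLe; simp at h; omega

lemma lexLtB_false_lexLe {a b : Int × Int} (h : lexLtB a b = false) : lexLe b a := by
  unfold lexLtB at h; unfold lexLe; simp at h; omega

lemma insertBy_pairwise_lexLe (x : Int × Int) (ys : List (Int × Int))
    (h : ys.Pairwise lexLe) :
    (PySem.List.insertBy lexLtB x ys).Pairwise lexLe := by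
  induction ys with
  | nil => simp [PySem.List.insertBy]
  | cons y ys ih =>
    rcases List.pairwise_cons.mp h with ⟨hy, hys⟩
    show (if lexLtB x y then x :: y :: ys else y :: PySem.List.insertBy lexLtB x ys).Pairwise lexLe
    split_ifs with hb
    · refine List.pairwise_cons.mpr ⟨?_, h⟩
      intro z hz
      rcases List.mem_cons.mp hz with rfl | hz
      · exact lexLtB_true_lexLe hb
      · exact lexLe_trans (lexLtB_true_lexLe hb) (hy z hz)
    · refine List.pairwise_cons.mpr ⟨?_, ih hys⟩
      intro z hz
      rcases (PySem.List.mem_insertBy lexLtB x z ys).mp hz with rfl | hz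
      · exact lexLtB_false_lexLe (by simpa using hb)
      · exact hy z hz

lemma foldl_insertBy_pairwise (xs acc : List (Int × Int)) (h : acc.Pairwise lexLe) :
    (xs.foldl (fun acc x => PySem.List.insertBy lexLtB x acc) acc).Pairwise lexLe := by
  induction xs generalizing acc with
  | nil => exact h
  | cons x xs ih => exact ih _ (insertBy_pairwise_lexLe x acc h)

lemma sorted2_pairwise_lexLe (xs : List (Int × Int)) :
    (PySem.List.sorted2 xs (fun p => p.1) (fun p => p.2)).Pairwise lexLe := by
  exact foldl_insertBy_pairwise xs [] (by simp)

-- Monotonicity of x-coordinates of a lexLe-pairwise list, at pyGetD level (indices in range).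
lemma pairwise_lexLe_getElem {s : List (Int × Int)} (hp : s.Pairwise lexLe)
    {i j : Nat} (hij : i ≤ j) (hj : j < s.length) : lexLe s[i] s[j] := by
  rcases Nat.lt_or_ge i j with h | h
  · exact List.pairwise_iff_getElem.mp hp i j (lt_of_lt_of_le (by omega) (le_of_lt hj)) hj h
  · have : i = j := by omega
    subst this; exact lexLe_refl _

-- bsearch correctness on a list whose x-coordinates are nondecreasing.
lemma bsearch_spec (s : List (Int × Int)) (hp : s.Pairwise lexLe) (xr : Int) :
    ∀ (fuel : Nat) (lo hi : Int), (hi - lo).toNat ≤ fuel →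
    0 ≤ lo → lo ≤ hi → hi < PySem.List.len s →
    ¬ (PySem.List.pyGetD s hi (0, 0)).1 < xr →
    lo ≤ bsearch s xr lo hi ∧ bsearch s xr lo hi ≤ hi ∧
      (∀ j : Int, lo ≤ j → j < bsearch s xr lo hi → (PySem.List.pyGetD s j (0, 0)).1 < xr) ∧
      ¬ (PySem.List.pyGetD s (bsearch s xr lo hi) (0, 0)).1 < xr := by
  intro fuel
  induction fuel with
  | zero =>
    intro lo hi hf h0 hlh hlen hhi
    have : hi = lo := by omega
    subst this
    rw [bsearch]; simp only [lt_irrefl, dite_false]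
    exact ⟨le_refl _, le_refl _, by intro j h1 h2; omega, hhi⟩
  | succ fuel ih =>
    intro lo hi hf h0 hlh hlen hhi
    rw [bsearch]
    split_ifs with hlt
    · -- lo < hi
      have hmb := bsearch_mid_bounds hlt
      have hlenN : s.length = (PySem.List.len s).toNat := by
        simp [PySem.List.len]
      set mid := PySem.Int.floordiv (lo + hi) 2 with hmid
      dsimp only
      split_ifs with hcmp
      · -- s[mid].1 < xr : recurse on (mid+1, hi)
        have h := ih (mid + 1) hi (by omega) (by omega) (by omega) hlen hhi
        refine ⟨by omega, h.2.1, ?_, h.2.2.2⟩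
        intro j hj1 hj2
        rcases Int.lt_or_le j (mid + 1) with hjm | hjm
        · -- j ≤ mid: use monotonicity up to mid
          have hjr : 0 ≤ j := by omega
          have hmlt : mid < PySem.List.len s := by omega
          rw [PySem.List.pyGetD_eq_getElem s (0,0) hjr (by omega)]
          rw [PySem.List.pyGetD_eq_getElem s (0,0) (by omega) (by omega)] at hcmp
          have hle := pairwise_lexLe_getElem hp (i := j.toNat) (j := mid.toNat)
            (by omega) (by omega)
          unfold lexLe at hle; omega
        · exact h.2.2.1 j hjm hj2
      · -- ¬ s[mid].1 < xr : recurse on (lo, mid)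
        have h := ih lo mid (by omega) h0 (by omega) (by omega) hcmp
        exact ⟨h.1, by omega, h.2.2.1, h.2.2.2⟩
    · -- lo = hi
      have : hi = lo := by omega
      subst this
      exact ⟨le_refl _, le_refl _, by intro j h1 h2; omega, hhi⟩

-- ===== VERDICT (by name: the statement is the Claim_ definition above) =====
theorem find_end_pts_spec : Claim_equal_find_end_pts := by
  intro ch_list _ hpre
  unfold Spec_find_end_pts
  match ch_list, hpre with
  | x :: t, _ =>
    -- ---- A's value: the two fold minima ----
    have hA : find_end_pts (x :: t) = (t.foldl stepL x, t.foldl stepR x) := by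
      show (PySem.List.pyRange 0 (x :: t).length 1).foldl
          (fun lr i => findEndStep lr (PySem.List.pyGetD (x :: t) i (0, 0))) (x, x) = _
      rw [show ((x :: t).length : Int) = PySem.List.len (x :: t) by simp [PySem.List.len]]
      rw [PySem.List.foldl_pyRange_zero_pyGetD (x :: t) (0, 0)
        (fun lr p => findEndStep lr p) (x, x)]
      simp only [List.foldl, funext (fun lr => funext (findEndStep_eq lr))]
      rw [stepL_self, stepR_self, foldl_prod]
    rw [hA]
    simp only [find_end_pts_alt]
    set s := PySem.List.sorted2 (x :: t) (fun p => p.1) (fun p => p.2) with hs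
    have hperm : s.Perm (x :: t) := PySem.List.sorted2_perm _ _ _ _
    have hp : s.Pairwise lexLe := hs ▸ sorted2_pairwise_lexLe (x :: t)
    have hlen : s.length = t.length + 1 := by simpa using hperm.length_eq
    have hlenI : PySem.List.len s = (s.length : Int) := by simp [PySem.List.len]
    have hmem : ∀ y, y ∈ s ↔ y ∈ x :: t := fun y => hperm.mem_iff
    -- left: s[0] is the lexLe-minimum, which is also what A's left fold computes
    have hL : PySem.List.pyGetD s 0 (0, 0) = t.foldl stepL x := by
      rw [PySem.List.pyGetD_eq_getElem s (0,0) (by omega) (by omega)]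
      have hspec := foldl_stepL_spec t x
      refine lexLe_antisymm ?_ ?_
      · rcases List.mem_iff_getElem.mp ((hmem _).mpr hspec.1) with ⟨j, hj, hje⟩
        have h := pairwise_lexLe_getElem hp (i := (0:Int).toNat) (j := j) (by omega) hj
        rw [hje] at h; exact h
      · exact hspec.2 _ ((hmem _).mp (List.getElem_mem _))
    -- s[-1] is the last element
    have hxrIdx : PySem.List.pyGetD s (-1) (0, 0) = s[s.length - 1]'(by omega) := by
      simp only [PySem.List.pyGetD, PySem.List.pyGet?, PySem.List.pyIdx?]
      rw [if_neg (by omega), if_pos (by omega)]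
      simp only [Option.bind]
      rw [List.getElem?_eq_getElem (by omega)]
      rfl
    set xr := (PySem.List.pyGetD s (-1) (0, 0)).1 with hxr
    have hmax : ∀ j (hj : j < s.length), (s[j]).1 ≤ xr := by
      intro j hj
      rw [hxr, hxrIdx]
      have h := pairwise_lexLe_getElem hp (i := j) (j := s.length - 1) (by omega) (by omega)
      unfold lexLe at h; omega
    have hb := bsearch_spec s hp xr ((PySem.List.len s - 1).toNat) 0 (PySem.List.len s - 1)
      (by omega) (by omega) (by omega) (by omega)
      (by rw [show PySem.List.len s - 1 = ((s.length - 1 : Nat) : Int) by omega,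
              PySem.List.pyGetD_eq_getElem s (0,0) (by omega) (by omega)]
          rw [hxr, hxrIdx]
          simp)
    set r := bsearch s xr 0 (PySem.List.len s - 1) with hr
    have hrlt : r.toNat < s.length := by omega
    -- right: s[r] is the revLe-minimum, which is also what A's right fold computes
    have hR : PySem.List.pyGetD s r (0, 0) = t.foldl stepR x := by
      rw [PySem.List.pyGetD_eq_getElem s (0,0) (by omega) (by omega)]
      have hspec := foldl_stepR_spec t x
      have hrx : (s[r.toNat]'hrlt).1 = xr := by
        have h1 := hmax r.toNat hrlt
        have h2 := hb.2.2.2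
        rw [PySem.List.pyGetD_eq_getElem s (0,0) (by omega) (by omega)] at h2
        omega
      refine revLe_antisymm ?_ (hspec.2 _ ((hmem _).mp (List.getElem_mem _)))
      rcases List.mem_iff_getElem.mp ((hmem _).mpr hspec.1) with ⟨j, hj, hje⟩
      rw [← hje]
      rcases Int.lt_or_le (s[j]'hj).1 xr with hltx | hgex
      · unfold revLe; left; rw [hrx]; exact hltx
      · have hjx : (s[j]'hj).1 = xr := le_antisymm (hmax j hj) hgex
        have hrj : r ≤ (j : Int) := by
          by_contra hc
          have hlt := hb.2.2.1 (j : Int) (by omega) (by omega)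
          rw [PySem.List.pyGetD_eq_getElem s (0,0) (by omega) (by exact_mod_cast hj)] at hlt
          simp only [Int.toNat_natCast] at hlt
          omega
        have hle := pairwise_lexLe_getElem hp (i := r.toNat) (j := j) (by omega) hj
        unfold revLe; unfold lexLe at hle; omega
    rw [hL, hR]
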